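-- pv_equiv track=rewrite | github.com/xdrabbit/json_parser | streamlit_viewer.py | summarize_message_ranges
-- ===== SOURCE A (Python) =====
-- def summarize_message_ranges(indices):
--     """Compactly describe contiguous message index ranges."""
--     if not indices:
--         return []
--
--     ranges = []
--     start = prev = indices[0]
--     for value in indices[1:]:
--         if value == prev + 1:
--             prev = value
--             continue
--         ranges.append(f"{start}-{prev}" if start != prev else str(start))
--         start = prev = value
--     ranges.append(f"{start}-{prev}" if start != prev else str(start))
--     return ranges
-- ===== SOURCE B (Python) =====
-- def summarize_message_ranges(indices):
--     """Compactly describe contiguous message index ranges."""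
--     if not indices:
--         return []
--     n = len(indices)
--     cuts = [i for i in range(1, n) if indices[i] != indices[i - 1] + 1]
--     bounds = [0] + cuts + [n]
--     return [
--         f"{indices[a]}-{indices[b - 1]}" if indices[a] != indices[b - 1] else str(indices[a])
--         for a, b in zip(bounds, bounds[1:])
--     ]
-- ===== Notes on version B (the rewrite author's own statement) =====
-- stated objective: alternative
-- what changed: Replaces A's single-pass start/prev state machine with a staged pipeline: first compute the break positions by a pairwise comparison over index positions, then zip the boundary list with its tail and format each boundary pair directly from the list by index arithmetic.
import Mathlib
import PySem

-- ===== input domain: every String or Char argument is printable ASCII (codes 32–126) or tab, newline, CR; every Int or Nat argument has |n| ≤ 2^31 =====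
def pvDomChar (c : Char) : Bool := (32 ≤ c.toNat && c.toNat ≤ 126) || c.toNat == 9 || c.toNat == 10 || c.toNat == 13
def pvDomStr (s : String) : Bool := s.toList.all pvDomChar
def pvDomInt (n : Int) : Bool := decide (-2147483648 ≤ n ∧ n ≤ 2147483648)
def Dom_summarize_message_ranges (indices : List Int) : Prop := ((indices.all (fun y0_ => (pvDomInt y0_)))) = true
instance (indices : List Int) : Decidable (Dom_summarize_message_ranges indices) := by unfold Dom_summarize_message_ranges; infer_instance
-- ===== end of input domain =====

-- B stages the work: it first computes the break positions by pairwise comparison,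
-- then formats each boundary pair by index arithmetic — no run state machine (objective: alternative).


-- ===== PORT A =====
-- f"{start}-{prev}" if start != prev else str(start)
def pvFmtA (start prev : Int) : String :=
  if start ≠ prev then PySem.Int.toStr start ++ "-" ++ PySem.Int.toStr prev else PySem.Int.toStr start

-- the `for value in indices[1:]` loop with state (ranges, start, prev); the final append is the [] case
def pvLoopA (start prev : Int) (ranges : List String) : List Int → List String
  | [] => ranges ++ [pvFmtA start prev]
  | v :: vs =>
      if v = prev + 1 then pvLoopA start v ranges vs
      else pvLoopA v v (ranges ++ [pvFmtA start prev]) vs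

def summarize_message_ranges (indices : List Int) : List String :=
  match indices with
  | [] => []
  | x :: rest => pvLoopA x x [] rest

-- ===== PORT B =====
def pvFmtB (s e : Int) : String :=
  if s ≠ e then PySem.Int.toStr s ++ "-" ++ PySem.Int.toStr e else PySem.Int.toStr s

-- cuts = [i for i in range(1, n) if indices[i] != indices[i-1] + 1]
-- (python range(1, n) over a nonempty list = List.range' 1 (n-1); all indexing is in range,
--  positions are nonnegative, so Nat positions with getD transcribe the python indexing exactly)
def pvCuts (indices : List Int) : List Nat :=
  (List.range' 1 (indices.length - 1)).filter
    (fun i => indices.getD i 0 ≠ indices.getD (i - 1) 0 + 1)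

def summarize_message_ranges_alt (indices : List Int) : List String :=
  match indices with
  | [] => []
  | _ :: _ =>
      let bounds : List Nat := 0 :: pvCuts indices ++ [indices.length]
      (bounds.zip bounds.tail).map (fun p =>
        pvFmtB (indices.getD p.1 0) (indices.getD (p.2 - 1) 0))

-- ===== PRECONDITION & SPEC =====
def Spec_summarize_message_ranges (indices : List Int) (out : List String) : Prop := out = summarize_message_ranges_alt indices
instance (indices : List Int) (out : List String) : Decidable (Spec_summarize_message_ranges indices out) := by unfold Spec_summarize_message_ranges; infer_instance

-- ===== CLAIM =====
def Claim_equal_summarize_message_ranges : Prop := ∀ (indices : List Int), Dom_summarize_message_ranges indices → Spec_summarize_message_ranges indices (summarize_message_ranges indices)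

-- ===== LEMMAS AND PROOFS =====
-- proof-only intermediate: the run-splitting recursion; both ports are related to it.
def pvTakeRun (p : Int) : List Int → List Int × List Int
  | [] => ([], [])
  | v :: vs =>
      if v = p + 1 then
        let pr := pvTakeRun v vs
        (v :: pr.1, pr.2)
      else ([], v :: vs)

theorem pvTakeRun_snd_len (p : Int) (l : List Int) : (pvTakeRun p l).2.length ≤ l.length := by
  induction l generalizing p with
  | nil => simp [pvTakeRun]
  | cons v vs ih =>
      simp only [pvTakeRun]
      split
      · exact le_trans (ih v) (Nat.le_succ _)
      · simp

def pvRunRec (indices : List Int) : List String :=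
  match indices with
  | [] => []
  | x :: xs =>
      let pr := pvTakeRun x xs
      pvFmtB x (pr.1.getLastD x) :: pvRunRec pr.2
termination_by indices.length
decreasing_by
  exact Nat.lt_succ_of_le (pvTakeRun_snd_len x xs)

theorem pvLoopA_eq (l : List Int) : ∀ (start prev : Int) (acc : List String),
    pvLoopA start prev acc l =
      acc ++ pvFmtB start ((pvTakeRun prev l).1.getLastD prev)
          :: pvRunRec (pvTakeRun prev l).2 := by
  induction l with
  | nil =>
      intro start prev acc
      simp [pvLoopA, pvTakeRun, pvRunRec, pvFmtA, pvFmtB]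
  | cons v vs ih =>
      intro start prev acc
      simp only [pvLoopA, pvTakeRun]
      by_cases h : v = prev + 1
      · simp only [h, if_true, ih, List.getLastD_cons]
      · rw [if_neg h, if_neg h, ih]
        simp only [List.getLastD_nil]
        rw [pvRunRec]
        simp [pvFmtA, pvFmtB, List.append_assoc]

theorem pvTakeRun_append (p : Int) (l : List Int) :
    l = (pvTakeRun p l).1 ++ (pvTakeRun p l).2 := by
  induction l generalizing p with
  | nil => simp [pvTakeRun]
  | cons v vs ih =>
      simp only [pvTakeRun]
      split
      · simpa using ih v
      · simp

theorem pvCuts_cons (x y : Int) (t : List Int) :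
    pvCuts (x :: y :: t) =
      (if y = x + 1 then [] else [1]) ++ (pvCuts (y :: t)).map (· + 1) := by
  unfold pvCuts
  have h2 : List.range' 2 ((y :: t).length - 1) 1
      = (List.range' 1 ((y :: t).length - 1) 1).map (fun i => 1 + i) := by
    rw [List.map_add_range']
  have hl : (x :: y :: t).length - 1 = ((y :: t).length - 1) + 1 := by simp
  rw [hl, List.range'_succ, List.filter_cons, h2, List.filter_map]
  have hfc : List.filter
        ((fun i => decide ((x :: y :: t).getD i 0 ≠ (x :: y :: t).getD (i - 1) 0 + 1)) ∘ (fun i => 1 + i))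
        (List.range' 1 ((y :: t).length - 1) 1)
      = List.filter (fun i => decide ((y :: t).getD i 0 ≠ (y :: t).getD (i - 1) 0 + 1))
        (List.range' 1 ((y :: t).length - 1) 1) := by
    apply List.filter_congr
    intro i hi
    have h1 : 1 ≤ i := by
      rcases List.mem_range'.1 hi with ⟨j, hj, rfl⟩; omega
    obtain ⟨j, rfl⟩ : ∃ j, i = j + 1 := ⟨i - 1, by omega⟩
    have e1 : 1 + (j + 1) = j + 1 + 1 := by omega
    simp [e1]
  rw [hfc]
  by_cases h : y = x + 1
  · simp [h, List.getD, Nat.add_comm]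
  · simp [h, List.getD, Nat.add_comm]

theorem pvCuts_takeRun (xs : List Int) (x : Int) :
    pvCuts (x :: xs) =
      (if (pvTakeRun x xs).2 = [] then []
       else ((pvTakeRun x xs).1.length + 1) ::
            (pvCuts (pvTakeRun x xs).2).map (· + ((pvTakeRun x xs).1.length + 1))) := by
  induction xs generalizing x with
  | nil => simp [pvTakeRun, pvCuts]
  | cons y t ih =>
      rw [pvCuts_cons]
      by_cases h : y = x + 1
      · rw [if_pos h]
        simp only [pvTakeRun, if_pos h]
        rw [ih y]
        by_cases hr : (pvTakeRun y t).2 = []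
        · simp [hr]
        · simp only [if_neg hr, List.nil_append, List.map_cons, List.map_map, List.length_cons]
          exact congrArg (List.cons _)
            (List.map_congr_left (fun a _ => by simp only [Function.comp_apply]; omega))
      · rw [if_neg h]
        simp only [pvTakeRun, if_neg h]
        simp

theorem getD_cons_last (x : Int) (run : List Int) :
    (x :: run).getD run.length 0 = run.getLastD x := by
  induction run generalizing x with
  | nil => rfl
  | cons a l ih =>
      rw [List.getLastD_cons]
      simpa [List.getD_cons_succ] using ih a

theorem pvZipShift (f : Nat × Nat → String) (g : Nat → Nat) (b : Nat) (bs : List Nat) :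
    ((((0 : Nat) :: (b :: bs).map g).zip ((b :: bs).map g)).map f)
      = f (0, g b) :: (((b :: bs).zip bs).map (fun p => f (g p.1, g p.2))) := by
  simp only [List.map_cons, List.zip_cons_cons, List.map_cons]
  congr 1
  rw [show (g b :: List.map g bs) = List.map g (b :: bs) from rfl, List.zip_map, List.map_map]
  rfl

theorem pvCutsMemGe (l : List Int) (m : Nat) (hm : m ∈ pvCuts l) : 1 ≤ m := by
  unfold pvCuts at hm
  rcases List.mem_range'.1 (List.mem_filter.1 hm).1 with ⟨i, hi, rfl⟩
  omega

theorem pvAlt_eq_runRec_aux (n : Nat) : ∀ (l : List Int), l.length ≤ n →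
    summarize_message_ranges_alt l = pvRunRec l := by
  induction n with
  | zero =>
      intro l hl
      have h0 : l = [] := by cases l <;> simp_all
      subst h0
      simp [summarize_message_ranges_alt, pvRunRec]
  | succ n ih =>
      intro l hl
      cases l with
      | nil => simp [summarize_message_ranges_alt, pvRunRec]
      | cons x xs =>
          rcases hTR : pvTakeRun x xs with ⟨run, rest⟩
          have hxs : xs = run ++ rest := by
            have h := pvTakeRun_append x xs
            rw [hTR] at h
            exact h
          have hcuts := pvCuts_takeRun xs x
          rw [hTR] at hcuts
          simp only at hcuts
          rw [pvRunRec]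
          simp only [hTR]
          cases rest with
          | nil =>
              have hxr : xs = run := by simpa using hxs
              subst hxr
              simp only [pvRunRec]
              show summarize_message_ranges_alt (x :: xs) = [pvFmtB x (xs.getLastD x)]
              simp only [summarize_message_ranges_alt]
              rw [hcuts]
              simp [List.zip_cons_cons]
              congr 1
              simpa using getD_cons_last x xs
          | cons z t' =>
              have hlen : xs.length = run.length + (z :: t').length := by
                rw [hxs]; simp
              have hrlen : (z :: t').length ≤ n := by
                simp only [List.length_cons] at hl hlen ⊢
                omega
              rw [← ih (z :: t') hrlen]
              show summarize_message_ranges_alt (x :: xs)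
                  = pvFmtB x (run.getLastD x) :: summarize_message_ranges_alt (z :: t')
              simp only [summarize_message_ranges_alt]
              rw [hcuts, if_neg (List.cons_ne_nil z t')]
              have hfull : x :: xs = (x :: run) ++ (z :: t') := by rw [hxs]; rfl
              have hN : (x :: xs).length = (z :: t').length + (run.length + 1) := by
                simp only [List.length_cons, hlen]
                omega
              rw [hN]
              have hsh : (((0 : Nat) :: (run.length + 1) :: List.map (fun v => v + (run.length + 1)) (pvCuts (z :: t'))) ++ [(z :: t').length + (run.length + 1)])
                  = 0 :: List.map (fun v => v + (run.length + 1)) ((0 : Nat) :: (pvCuts (z :: t') ++ [(z :: t').length])) := by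
                simp
              rw [hsh, List.tail_cons]
              rw [show ((0 : Nat) :: pvCuts (z :: t')) ++ [(z :: t').length] = (0 : Nat) :: (pvCuts (z :: t') ++ [(z :: t').length]) from rfl, List.tail_cons]
              rw [pvZipShift]
              congr 1
              · show pvFmtB ((x :: xs).getD 0 0) ((x :: xs).getD (0 + (run.length + 1) - 1) 0)
                    = pvFmtB x (run.getLastD x)
                have h0 : (0 : Nat) + (run.length + 1) - 1 = run.length := by omega
                rw [h0]
                congr 1
                rw [hfull, List.getD_append (x :: run) (z :: t') 0 run.length (by simp),
                  getD_cons_last]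
              · apply List.map_congr_left
                rintro ⟨a, b⟩ hp
                have hb : b ∈ pvCuts (z :: t') ++ [(z :: t').length] := (List.of_mem_zip hp).2
                have hb1 : 1 ≤ b := by
                  rcases List.mem_append.1 hb with hbc | hbl
                  · exact pvCutsMemGe _ _ hbc
                  · simp only [List.mem_singleton] at hbl
                    subst hbl
                    simp
                show pvFmtB ((x :: xs).getD (a + (run.length + 1)) 0)
                      ((x :: xs).getD (b + (run.length + 1) - 1) 0)
                    = pvFmtB ((z :: t').getD a 0) ((z :: t').getD (b - 1) 0)
                have hlr1 : (x :: run).length = run.length + 1 := by simp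
                congr 1
                · rw [hfull, List.getD_append_right (x :: run) (z :: t') 0 _ (by omega)]
                  congr 1
                  omega
                · rw [hfull, List.getD_append_right (x :: run) (z :: t') 0 _ (by omega)]
                  congr 1
                  omega

theorem pvAlt_eq_runRec (l : List Int) :
    summarize_message_ranges_alt l = pvRunRec l :=
  pvAlt_eq_runRec_aux l.length l le_rfl

-- ===== VERDICT =====
theorem summarize_message_ranges_spec : Claim_equal_summarize_message_ranges := by
  intro indices _
  unfold Spec_summarize_message_ranges
  rw [pvAlt_eq_runRec]
  cases indices with
  | nil => simp [summarize_message_ranges, pvRunRec]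
  | cons x xs =>
      show pvLoopA x x [] xs = _
      rw [pvLoopA_eq, pvRunRec]
      simp [List.getLastD]
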